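-- pv_equiv track=rewrite | github.com/junaid-iw/TableTennisLadder | scores.py | existingWin
-- ===== SOURCE A (Python) =====
-- def existingWin(rankings, winner, loser):
--     loser_position = rankings.index(loser)
--     winner_position = rankings.index(winner)
--
--     if winner_position > loser_position:
--         new_rankings = []
--
--         #produces new rankings
--         for index, player in enumerate(rankings):
--             if index == loser_position:
--                 new_rankings.append(winner)
--                 new_rankings.append(loser)
--             elif index != winner_position:
--                 new_rankings.append(rankings[index])
--         rankings = new_rankings
--     return rankings
-- ===== SOURCE B (Python) =====
-- def existingWin(rankings, winner, loser):
--     loser_position = rankings.index(loser)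
--     winner_position = rankings.index(winner)
--     if winner_position > loser_position:
--         rankings = (rankings[:loser_position]
--                     + [winner, loser]
--                     + rankings[loser_position + 1:winner_position]
--                     + rankings[winner_position + 1:])
--     return rankings
-- ===== Notes on version B (the rewrite author's own statement) =====
-- stated objective: simpler
-- what changed: The element-by-element enumerate loop with per-index branches is replaced by building the new ranking from four slices concatenated around [winner, loser].
import Mathlib
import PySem

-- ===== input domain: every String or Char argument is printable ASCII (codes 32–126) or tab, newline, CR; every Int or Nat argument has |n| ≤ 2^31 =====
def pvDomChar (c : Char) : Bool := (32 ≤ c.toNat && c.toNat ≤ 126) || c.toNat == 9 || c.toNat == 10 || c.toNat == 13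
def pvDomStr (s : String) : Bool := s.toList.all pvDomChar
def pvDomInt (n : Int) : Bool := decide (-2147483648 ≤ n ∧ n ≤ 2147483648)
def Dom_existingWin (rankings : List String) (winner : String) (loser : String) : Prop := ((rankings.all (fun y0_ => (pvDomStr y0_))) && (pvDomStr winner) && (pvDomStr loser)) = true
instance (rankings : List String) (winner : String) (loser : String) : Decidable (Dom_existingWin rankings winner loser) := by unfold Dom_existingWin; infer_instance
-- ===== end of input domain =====

-- B replaces the enumerate loop with four-slice concatenation (objective: simpler);
-- Python A does not mutate its argument, so return-value equivalence is full equivalence.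

-- ===== PORT A =====
-- the enumerate loop of A: per-index branches appending to new_rankings
def existingWinLoop (rankings : List String) (winner loser : String) (lp wp : Int) : List String :=
  (PySem.List.enumerate rankings 0).foldl
    (fun acc ip =>
      if ip.1 = lp then acc ++ [winner, loser]
      else if ip.1 ≠ wp then acc ++ [PySem.List.pyGetD rankings ip.1 ""]   -- rankings[index]; in range for every enumerate index
      else acc) []

def existingWin (rankings : List String) (winner : String) (loser : String) : List String :=
  match PySem.List.index? rankings loser with
  | none => rankings            -- ValueError: outside Pre_
  | some lp =>
    match PySem.List.index? rankings winner with
    | none => rankings          -- ValueError: outside Pre_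
    | some wp =>
      if (wp : Int) > (lp : Int) then existingWinLoop rankings winner loser lp wp
      else rankings

-- ===== PORT B =====
def existingWin_alt (rankings : List String) (winner : String) (loser : String) : List String :=
  match PySem.List.index? rankings loser, PySem.List.index? rankings winner with
  | some lp, some wp =>
    if (wp : Int) > (lp : Int) then
      PySem.List.slice rankings none (some (lp : Int))
        ++ [winner, loser]
        ++ PySem.List.slice rankings (some ((lp : Int) + 1)) (some (wp : Int))
        ++ PySem.List.slice rankings (some ((wp : Int) + 1)) none
    else rankings
  | _, _ => rankings            -- ValueError: outside Pre_

-- ===== PRECONDITION & SPEC =====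
-- Pre_ excludes exactly the inputs where A raises ValueError (.index on a missing player)
def Pre_existingWin (rankings : List String) (winner : String) (loser : String) : Prop :=
  loser ∈ rankings ∧ winner ∈ rankings
instance (rankings : List String) (winner : String) (loser : String) : Decidable (Pre_existingWin rankings winner loser) := by unfold Pre_existingWin; infer_instance

def pvWitness_existingWin : List String × String × String := (["a", "b", "c"], "c", "a")

def Spec_existingWin (rankings : List String) (winner : String) (loser : String) (out : List String) : Prop := out = existingWin_alt rankings winner loser
instance (rankings : List String) (winner : String) (loser : String) (out : List String) : Decidable (Spec_existingWin rankings winner loser out) := by unfold Spec_existingWin; infer_instance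

-- ===== CLAIM (what is proved, stated in full; the proofs are below) =====
def Claim_equal_existingWin : Prop := ∀ (rankings : List String) (winner : String) (loser : String), Dom_existingWin rankings winner loser → Pre_existingWin rankings winner loser → Spec_existingWin rankings winner loser (existingWin rankings winner loser)

-- ===== LEMMAS AND PROOFS =====

-- the per-element contribution of A's loop body
def pvStep (winner loser : String) (lp wp : Int) (ip : Int × String) : List String :=
  if ip.1 = lp then [winner, loser] else if ip.1 ≠ wp then [ip.2] else []

theorem pvLoop_eq_flatMap (rankings : List String) (winner loser : String) (lp wp : Int) :
    existingWinLoop rankings winner loser lp wp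
      = (PySem.List.enumerate rankings 0).flatMap (pvStep winner loser lp wp) := by
  unfold existingWinLoop
  have hcong : ∀ (acc : List String) (ip : Int × String), ip ∈ PySem.List.enumerate rankings 0 →
      (if ip.1 = lp then acc ++ [winner, loser]
       else if ip.1 ≠ wp then acc ++ [PySem.List.pyGetD rankings ip.1 ""]
       else acc) = acc ++ pvStep winner loser lp wp ip := by
    intro acc ip hip
    rcases (PySem.List.mem_enumerate_iff _ _ _).1 hip with ⟨k, hk, rfl⟩
    unfold pvStep
    simp [PySem.List.pyGetD_natCast, List.getD_eq_getElem?_getD, hk]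
    split_ifs <;> simp
  rw [PySem.List.foldl_congr_mem _ _ _ _ hcong, PySem.List.foldl_append_eq_flatMap]
  simp

theorem pvFlatMap_id (winner loser : String) (lp wp : Int) (xs : List String) (s : Int)
    (h : ∀ i : Int, s ≤ i → i < s + xs.length → i ≠ lp ∧ i ≠ wp) :
    (PySem.List.enumerate xs s).flatMap (pvStep winner loser lp wp) = xs := by
  induction xs generalizing s with
  | nil => simp [PySem.List.enumerate_nil]
  | cons x xs ih =>
    rw [PySem.List.enumerate_cons]
    have hx := h s (le_refl s) (by simp only [List.length_cons]; push_cast; omega)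
    simp only [List.flatMap_cons]
    rw [ih (s + 1) (by intro i h1 h2; exact h i (by omega) (by simp only [List.length_cons]; push_cast; omega))]
    unfold pvStep
    simp [hx.1, hx.2]

-- ===== VERDICT (by name: the statement is the Claim_ definition above) =====
theorem existingWin_spec : Claim_equal_existingWin := by
  intro rankings winner loser _ hpre
  obtain ⟨hl, hw⟩ := hpre
  obtain ⟨lp, hlp⟩ := Option.isSome_iff_exists.1 ((PySem.List.index?_isSome_iff rankings loser).2 hl)
  obtain ⟨wp, hwp⟩ := Option.isSome_iff_exists.1 ((PySem.List.index?_isSome_iff rankings winner).2 hw)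
  unfold Spec_existingWin existingWin existingWin_alt
  rw [hlp, hwp]
  by_cases hgt : (wp : Int) > (lp : Int)
  · simp only [hgt, if_pos]
    -- decompose rankings at the two positions
    rcases (PySem.List.index?_eq_some_iff rankings loser lp).1 hlp with ⟨t1, s, hdec, ht1len, _⟩
    obtain ⟨hwlt, hwget, _⟩ := PySem.List.getElem_of_index?_eq_some hwp
    have hlpwp : lp < wp := by exact_mod_cast hgt
    -- s[wp - lp - 1] = winner
    have hslen : s.length = rankings.length - lp - 1 := by
      subst hdec; simp at hwlt ⊢; omega
    have hk : wp - lp - 1 < s.length := by omega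
    have hsget : s[wp - lp - 1] = winner := by
      have h := hwget
      subst hdec
      rw [List.getElem_append_right (by omega)] at h
      simp only [ht1len] at h
      have h' : (loser :: s)[wp - lp]? = some winner := by
        rw [List.getElem?_eq_getElem (by simp; omega)]; exact congrArg some h
      rw [show wp - lp = (wp - lp - 1) + 1 from by omega, List.getElem?_cons_succ] at h'
      exact (List.getElem_eq_iff hk).2 h'
    set k := wp - lp - 1 with hkdef
    have hsdec : s = s.take k ++ winner :: s.drop (k + 1) := by
      conv_lhs => rw [← List.take_append_drop k s]
      rw [List.drop_eq_getElem_cons hk, hsget]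
    set t2 := s.take k with ht2
    set t3 := s.drop (k + 1) with ht3
    have ht2len : t2.length = k := by simp [ht2]; omega
    have hrdec : rankings = t1 ++ loser :: (t2 ++ winner :: t3) := by
      rw [hdec, ← hsdec]
    -- LHS
    rw [pvLoop_eq_flatMap, hrdec, PySem.List.enumerate_append, List.flatMap_append,
      PySem.List.enumerate_cons, List.flatMap_cons, PySem.List.enumerate_append,
      List.flatMap_append, PySem.List.enumerate_cons, List.flatMap_cons]
    have hlp_eq : (t1.length : Int) = (lp : Int) := by exact_mod_cast ht1len
    have hwp_eq : ((0 : Int) + t1.length + 1 + t2.length) = (wp : Int) := by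
      rw [hlp_eq]; push_cast [ht2len]; omega
    rw [pvFlatMap_id winner loser lp wp t1 0
        (by intro i h1 h2; rw [hlp_eq] at h2; constructor <;> [skip; skip] <;> intro hEq <;> subst hEq <;>
            [exact absurd h2 (by omega); exact absurd h2 (by push_cast at *; omega)]),
      pvFlatMap_id winner loser lp wp t2 (0 + (t1.length : Int) + 1)
        (by intro i h1 h2; rw [hlp_eq] at h1
            constructor <;> intro hEq <;> subst hEq
            · omega
            · rw [← hwp_eq] at h2; omega),
      pvFlatMap_id winner loser lp wp t3 (0 + (t1.length : Int) + 1 + t2.length + 1)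
        (by intro i h1 h2; rw [hwp_eq] at h1
            constructor <;> intro hEq <;> subst hEq <;> omega)]
    have hstep_l : pvStep winner loser lp wp (0 + (t1.length : Int), loser) = [winner, loser] := by
      unfold pvStep; simp [hlp_eq]
    have hstep_w : pvStep winner loser lp wp (0 + (t1.length : Int) + 1 + t2.length, winner) = [] := by
      unfold pvStep
      have h2 : (((t1.length : Int)) + 1 + t2.length = wp) := by omega
      simp [h2]
      omega
    rw [hstep_l, hstep_w]
    -- RHS slices
    have hsl1 : PySem.List.slice rankings none (some (lp : Int)) = t1 := by
      rw [PySem.List.slice_to_natCast, hrdec, ← ht1len, List.take_left]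
    have hd1 : rankings.drop (lp + 1) = t2 ++ winner :: t3 := by
      rw [hrdec, List.drop_append]
      simp [ht1len]
    have hsl2 : PySem.List.slice rankings (some ((lp : Int) + 1)) (some (wp : Int)) = t2 := by
      have hc : ((lp : Int) + 1) = ((lp + 1 : Nat) : Int) := by push_cast; ring
      rw [hc, PySem.List.slice_natCast, hd1]
      rw [show wp - (lp + 1) = k from by omega, ← ht2len, List.take_left]
    have hsl3 : PySem.List.slice rankings (some ((wp : Int) + 1)) none = t3 := by
      have hc : ((wp : Int) + 1) = ((wp + 1 : Nat) : Int) := by push_cast; ring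
      rw [hc, PySem.List.slice_from_natCast,
        show wp + 1 = (lp + 1) + (k + 1) from by omega, ← List.drop_drop, hd1,
        List.drop_append]
      simp [ht2len]
    rw [← hrdec, hsl1, hsl2, hsl3]
    simp
  · simp [hgt]
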